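-- pv_equiv track=rewrite | github.com/lucaslimasilvafoligem/P1_python | prova/ofuscador/ofuscador.py | regra_3
-- ===== SOURCE A (Python) =====
-- def regra_3(lista):
--     terceira_regra = ""
--     contador = 0
--     for caractere in lista:
--         if caractere == " ":
--             terceira_regra += "*" * contador
--             contador = 0
--         else:
--             terceira_regra += caractere
--             contador += 1
--     return terceira_regra
-- ===== SOURCE B (Python) =====
-- def regra_3(lista):
--     parts = lista.split(' ')
--     pieces = [parts[0]]
--     for i in range(1, len(parts)):
--         pieces.append('*' * len(parts[i - 1]) + parts[i])
--     return ''.join(pieces)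
-- ===== Notes on version B (the rewrite author's own statement) =====
-- stated objective: faster
-- what changed: B splits the string on the space character into segments once and reconstructs the result by prepending an asterisk run of the previous segment's length to each later segment (join of pieces), instead of A's single pass with a running counter and repeated string concatenation.
import Mathlib
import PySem

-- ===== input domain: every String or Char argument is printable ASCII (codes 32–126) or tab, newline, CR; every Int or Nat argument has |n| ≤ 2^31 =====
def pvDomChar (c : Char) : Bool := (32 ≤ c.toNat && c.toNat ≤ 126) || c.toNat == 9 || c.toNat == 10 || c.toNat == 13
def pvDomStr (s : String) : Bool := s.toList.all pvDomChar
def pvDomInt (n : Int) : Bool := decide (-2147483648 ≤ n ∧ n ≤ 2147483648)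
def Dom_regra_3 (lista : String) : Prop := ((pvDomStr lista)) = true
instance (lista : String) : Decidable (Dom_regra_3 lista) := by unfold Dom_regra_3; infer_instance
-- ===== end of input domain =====

-- B replaces A's running-counter pass with split-on-space + reconstruction from segment lengths; return values proved equal on all strings.


-- ===== PORT A =====
-- A: one pass; append '*' * contador at each space (reset), else append the char and count it.
def regra_3 (lista : String) : String :=
  let r := lista.toList.foldl
    (fun (st : List Char × Nat) caractere =>
      if caractere = ' ' then (st.1 ++ List.replicate st.2 '*', 0)
      else (st.1 ++ [caractere], st.2 + 1))
    ([], 0)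
  String.ofList r.1

-- ===== PORT B =====
-- hand port of lista.split(' ') (single-char separator): returns (first segment, later segments); exact here
def splitSp : List Char → List Char × List (List Char)
  | [] => ([], [])
  | c :: cs =>
    let (p, ps) := splitSp cs
    if c = ' ' then ([], p :: ps) else (c :: p, ps)

-- the loop of Source B: each later segment is prefixed by '*' * len(previous segment)
def buildB : List Char → List (List Char) → List Char
  | _, [] => []
  | prev, p :: ps => List.replicate prev.length '*' ++ p ++ buildB p ps

def regra_3_alt (lista : String) : String :=
  let (p, rest) := splitSp lista.toList
  String.ofList (p ++ buildB p rest)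

-- ===== PRECONDITION & SPEC =====
def Spec_regra_3 (lista : String) (out : String) : Prop := out = regra_3_alt lista
instance (lista : String) (out : String) : Decidable (Spec_regra_3 lista out) := by unfold Spec_regra_3; infer_instance

-- ===== CLAIM (what is proved, stated in full; the proofs are below) =====
def Claim_equal_regra_3 : Prop := ∀ (lista : String), Dom_regra_3 lista → Spec_regra_3 lista (regra_3 lista)

-- ===== LEMMAS AND PROOFS =====

-- common characterisation of the output
def specF : List Char → Nat → List Char
  | [], _ => []
  | c :: cs, k => if c = ' ' then List.replicate k '*' ++ specF cs 0 else c :: specF cs (k + 1)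

theorem foldA_eq (cs : List Char) : ∀ (acc : List Char) (k : Nat),
    (cs.foldl
      (fun (st : List Char × Nat) caractere =>
        if caractere = ' ' then (st.1 ++ List.replicate st.2 '*', 0)
        else (st.1 ++ [caractere], st.2 + 1))
      (acc, k)).1 = acc ++ specF cs k := by
  induction cs with
  | nil => intro acc k; simp [specF]
  | cons c cs ih =>
    intro acc k
    by_cases h : c = ' ' <;> simp [specF, h, List.foldl, ih, List.append_assoc]

theorem buildB_eq (cs : List Char) : ∀ (prev : List Char),
    (splitSp cs).1 ++ buildB (prev ++ (splitSp cs).1) (splitSp cs).2 = specF cs prev.length := by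
  induction cs with
  | nil => intro prev; simp [splitSp, buildB, specF]
  | cons c cs ih =>
    intro prev
    by_cases h : c = ' '
    · have h2 := ih []
      simp only [List.nil_append] at h2
      simp [splitSp, h, specF, buildB, h2]
    · have h2 := ih (prev ++ [c])
      simp only [splitSp, h, specF, ite_false]
      simp only [List.length_append, List.length_singleton] at h2
      simp only [List.append_assoc] at h2 ⊢
      simp [← h2]

-- ===== VERDICT (by name: the statement is the Claim_ definition above) =====
theorem regra_3_spec : Claim_equal_regra_3 := by
  intro lista _
  unfold Spec_regra_3 regra_3 regra_3_alt
  have hA := foldA_eq lista.toList [] 0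
  have hB := buildB_eq lista.toList []
  simp only [List.nil_append, List.length_nil] at hA hB
  simp [hA, hB]
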